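-- pv_equiv track=rewrite | github.com/joram/steps | api/modes.py | _nyan_pixels
-- ===== SOURCE A (Python) =====
-- def _nyan_pixels(x=3):
--     nyan_pixels = []
--     for i in range(0, x * 2):
--         nyan_pixels.append((255, 255, 255))
--     for i in range(0, x):
--         nyan_pixels.append((255, 0, 0))
--     for i in range(0, x):
--         nyan_pixels.append((255, 88, 0))
--     for i in range(0, x):
--         nyan_pixels.append((255, 255, 0))
--     for i in range(0, x):
--         nyan_pixels.append((0, 255, 0))
--     for i in range(0, x):
--         nyan_pixels.append((0, 0, 255))
--     for i in range(0, x):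
--         nyan_pixels.append((255, 0, 255))
--     return nyan_pixels
-- ===== SOURCE B (Python) =====
-- def _nyan_pixels(x=3):
--     # Index-based construction: pixel i is determined directly by which of the
--     # eight equal-width bands of the rainbow it falls in (band = i // x; the
--     # first two bands are both white, giving white its double width).
--     palette = [
--         (255, 255, 255), (255, 255, 255),
--         (255, 0, 0), (255, 88, 0), (255, 255, 0),
--         (0, 255, 0), (0, 0, 255), (255, 0, 255),
--     ]
--     return [palette[i // x] for i in range(8 * x)]
-- ===== Notes on version B (the rewrite author's own statement) =====
-- stated objective: alternative
-- what changed: Instead of appending colors block by block in seven loops, B computes each pixel directly from its index in a single comprehension: pixel i is palette[i // x], mapping the index to its color band.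
import Mathlib
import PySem

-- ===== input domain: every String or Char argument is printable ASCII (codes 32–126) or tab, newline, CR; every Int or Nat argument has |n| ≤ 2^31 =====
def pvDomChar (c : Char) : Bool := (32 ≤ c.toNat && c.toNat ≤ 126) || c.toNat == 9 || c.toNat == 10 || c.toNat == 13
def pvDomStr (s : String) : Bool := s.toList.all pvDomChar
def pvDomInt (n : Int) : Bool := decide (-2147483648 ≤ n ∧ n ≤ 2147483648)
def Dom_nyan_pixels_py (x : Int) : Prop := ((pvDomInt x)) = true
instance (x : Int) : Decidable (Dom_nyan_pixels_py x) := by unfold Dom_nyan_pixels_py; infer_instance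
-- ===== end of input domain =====

-- B computes each pixel directly from its index (palette[i // x] over one range) instead of A's seven block-append loops; objective: alternative.


-- ===== PORT A =====
def nyan_pixels_py (x : Int) : List (Int × Int × Int) :=
  let p := (PySem.List.pyRange 0 (x * 2) 1).foldl (fun acc _ => acc ++ [((255:Int), (255:Int), (255:Int))]) []
  let p := (PySem.List.pyRange 0 x 1).foldl (fun acc _ => acc ++ [((255:Int), (0:Int), (0:Int))]) p
  let p := (PySem.List.pyRange 0 x 1).foldl (fun acc _ => acc ++ [((255:Int), (88:Int), (0:Int))]) p
  let p := (PySem.List.pyRange 0 x 1).foldl (fun acc _ => acc ++ [((255:Int), (255:Int), (0:Int))]) p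
  let p := (PySem.List.pyRange 0 x 1).foldl (fun acc _ => acc ++ [((0:Int), (255:Int), (0:Int))]) p
  let p := (PySem.List.pyRange 0 x 1).foldl (fun acc _ => acc ++ [((0:Int), (0:Int), (255:Int))]) p
  let p := (PySem.List.pyRange 0 x 1).foldl (fun acc _ => acc ++ [((255:Int), (0:Int), (255:Int))]) p
  p

-- ===== PORT B =====
-- the eight-band palette B indexes into (bands 0 and 1 are both white)
def nyanPalette : List (Int × Int × Int) :=
  [((255:Int), (255:Int), (255:Int)), ((255:Int), (255:Int), (255:Int)),
   ((255:Int), (0:Int), (0:Int)), ((255:Int), (88:Int), (0:Int)), ((255:Int), (255:Int), (0:Int)),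
   ((0:Int), (255:Int), (0:Int)), ((0:Int), (0:Int), (255:Int)), ((255:Int), (0:Int), (255:Int))]

-- palette[i // x]: for every i produced by range(8*x), 0 ≤ i // x < 8, so the
-- indexing never fails in Python; the pyGetD default is therefore never used.
def nyan_pixels_py_alt (x : Int) : List (Int × Int × Int) :=
  (PySem.List.pyRange 0 (8 * x) 1).map
    (fun i => PySem.List.pyGetD nyanPalette (PySem.Int.floordiv i x) ((0:Int), (0:Int), (0:Int)))

-- ===== PRECONDITION & SPEC =====
def Spec_nyan_pixels_py (x : Int) (out : List (Int × Int × Int)) : Prop := out = nyan_pixels_py_alt x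
instance (x : Int) (out : List (Int × Int × Int)) : Decidable (Spec_nyan_pixels_py x out) := by unfold Spec_nyan_pixels_py; infer_instance

-- ===== CLAIM (what is proved, stated in full; the proofs are below) =====
def Claim_equal_nyan_pixels_py : Prop := ∀ (x : Int), Dom_nyan_pixels_py x → Spec_nyan_pixels_py x (nyan_pixels_py x)

-- ===== LEMMAS AND PROOFS =====
theorem foldl_append_const {α β : Type} (c : β) :
    ∀ (l : List α) (acc : List β), l.foldl (fun a _ => a ++ [c]) acc = acc ++ List.replicate l.length c := by
  intro l
  induction l with
  | nil => intro acc; simp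
  | cons h t ih => intro acc; rw [List.foldl_cons, ih]; simp [List.replicate_succ]

-- i // x is constant (= k) across the k-th band [k*x, (k+1)*x)
theorem floordiv_band {x i k : Int} (hx : 0 < x) (h1 : k * x ≤ i) (h2 : i < (k + 1) * x) :
    PySem.Int.floordiv i x = k := by
  have hd := Int.ediv_add_emod i x
  have hr1 : 0 ≤ i % x := Int.emod_nonneg i (by omega)
  have hr2 : i % x < x := Int.emod_lt_of_pos i hx
  have : i / x = k := by nlinarith [hd, hr1, hr2]
  simpa [PySem.Int.floordiv, Int.fdiv_eq_ediv_of_nonneg i (le_of_lt hx)] using this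

-- the map over one band collapses to a replicate of that band's palette entry
theorem map_band (x k : Int) (hx : 0 < x) (hk : 0 ≤ k) :
    (PySem.List.pyRange (k * x) ((k + 1) * x) 1).map
        (fun i => PySem.List.pyGetD nyanPalette (PySem.Int.floordiv i x) ((0:Int), (0:Int), (0:Int)))
      = List.replicate x.toNat (PySem.List.pyGetD nyanPalette k ((0:Int), (0:Int), (0:Int))) := by
  have hmap : (PySem.List.pyRange (k * x) ((k + 1) * x) 1).map
      (fun i => PySem.List.pyGetD nyanPalette (PySem.Int.floordiv i x) ((0:Int), (0:Int), (0:Int)))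
      = (PySem.List.pyRange (k * x) ((k + 1) * x) 1).map
        (fun _ => PySem.List.pyGetD nyanPalette k ((0:Int), (0:Int), (0:Int))) := by
    apply List.map_congr_left
    intro i hi
    rw [PySem.List.mem_pyRange_one] at hi
    rw [floordiv_band hx hi.1 hi.2]
  rw [hmap, List.map_const']
  congr 1
  rw [PySem.List.length_pyRange_one]
  have h : (k + 1) * x - k * x = x := by ring
  rw [h]

-- ===== VERDICT (by name: the statement is the Claim_ definition above) =====
theorem nyan_pixels_py_spec : Claim_equal_nyan_pixels_py := by
  intro x _
  unfold Spec_nyan_pixels_py nyan_pixels_py nyan_pixels_py_alt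
  by_cases hx : x ≤ 0
  · rw [PySem.List.pyRange_one_eq_nil (by omega), PySem.List.pyRange_one_eq_nil (by omega),
        PySem.List.pyRange_one_eq_nil (by omega)]
    simp
  · push_neg at hx
    -- split B's single range into the eight bands
    have hsplit : PySem.List.pyRange 0 (8 * x) 1
        = PySem.List.pyRange 0 x 1 ++ (PySem.List.pyRange x (2*x) 1 ++ (PySem.List.pyRange (2*x) (3*x) 1
          ++ (PySem.List.pyRange (3*x) (4*x) 1 ++ (PySem.List.pyRange (4*x) (5*x) 1
          ++ (PySem.List.pyRange (5*x) (6*x) 1 ++ (PySem.List.pyRange (6*x) (7*x) 1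
          ++ PySem.List.pyRange (7*x) (8*x) 1)))))) := by
      rw [PySem.List.pyRange_one_append 0 x (8*x) (by omega) (by omega)]; congr 1
      rw [PySem.List.pyRange_one_append x (2*x) (8*x) (by omega) (by omega)]; congr 1
      rw [PySem.List.pyRange_one_append (2*x) (3*x) (8*x) (by omega) (by omega)]; congr 1
      rw [PySem.List.pyRange_one_append (3*x) (4*x) (8*x) (by omega) (by omega)]; congr 1
      rw [PySem.List.pyRange_one_append (4*x) (5*x) (8*x) (by omega) (by omega)]; congr 1
      rw [PySem.List.pyRange_one_append (5*x) (6*x) (8*x) (by omega) (by omega)]; congr 1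
      rw [PySem.List.pyRange_one_append (6*x) (7*x) (8*x) (by omega) (by omega)]
    rw [hsplit]
    simp only [List.map_append]
    have hb : ∀ k : Int, 0 ≤ k →
        (PySem.List.pyRange (k * x) ((k + 1) * x) 1).map
          (fun i => PySem.List.pyGetD nyanPalette (PySem.Int.floordiv i x) ((0:Int), (0:Int), (0:Int)))
        = List.replicate x.toNat (PySem.List.pyGetD nyanPalette k ((0:Int), (0:Int), (0:Int))) :=
      fun k hk => map_band x k hx hk
    have h0 := hb 0 (by omega); have h1 := hb 1 (by omega); have h2 := hb 2 (by omega)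
    have h3 := hb 3 (by omega); have h4 := hb 4 (by omega); have h5 := hb 5 (by omega)
    have h6 := hb 6 (by omega); have h7 := hb 7 (by omega)
    norm_num at h0 h1 h2 h3 h4 h5 h6 h7
    rw [h0, h1, h2, h3, h4, h5, h6, h7]
    -- evaluate A's foldl loops into replicates
    simp only [foldl_append_const, PySem.List.length_pyRange_one]
    have e2 : (x * 2 - 0).toNat = x.toNat + x.toNat := by omega
    have e1 : (x - 0).toNat = x.toNat := by omega
    rw [e1, e2]
    simp only [List.replicate_add, List.append_assoc]
    simp [nyanPalette, PySem.List.pyGetD, PySem.List.pyGet?, PySem.List.pyIdx?]
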